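-- pv_equiv track=rewrite | github.com/mateicojo/python-assignments | A2/main.py | strand
-- ===== SOURCE A (Python) =====
-- def strand(inp):
--     element, sub = 0, [inp.pop(0)]
--     while element < len(inp):
--         if inp[element] > sub[-1]:
--             sub.append(inp.pop(element))
--         else:
--             element += 1
--     return sub
-- ===== SOURCE B (Python) =====
-- def strand(inp):
--     first = inp[0]
--     sub, rem, last = [first], [], first
--     for x in inp[1:]:
--         if x > last:
--             sub.append(x)
--             last = x
--         else:
--             rem.append(x)
--     inp[:] = rem
--     return sub
-- ===== Notes on version B (the rewrite author's own statement) =====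
-- stated objective: faster
-- what changed: Replaces the index-and-pop scan (each pop shifts the tail, O(n^2)) with one linear pass that partitions the tail into the strand and a remainder list, then assigns inp[:] = remainder (same final list state).
-- outside the precondition, e.g. on strand([]): A raises IndexError, B raises IndexError
import Mathlib
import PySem

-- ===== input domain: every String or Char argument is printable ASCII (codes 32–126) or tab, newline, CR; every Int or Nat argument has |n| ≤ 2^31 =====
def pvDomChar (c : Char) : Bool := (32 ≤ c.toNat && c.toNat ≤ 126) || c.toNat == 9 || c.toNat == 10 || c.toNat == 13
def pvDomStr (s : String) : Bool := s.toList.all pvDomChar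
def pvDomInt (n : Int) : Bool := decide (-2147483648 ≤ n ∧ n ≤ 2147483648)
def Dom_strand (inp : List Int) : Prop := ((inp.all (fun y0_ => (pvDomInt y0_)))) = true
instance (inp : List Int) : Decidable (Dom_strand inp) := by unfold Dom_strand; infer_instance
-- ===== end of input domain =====

-- B replaces A's index-and-pop scan with one linear pass (O(n) vs O(n^2)); both mutate inp
-- to the remainder in Python, and the equivalence proved here is about the RETURN value.


-- ===== PORT A =====
-- A's while loop: 'element' is the index cursor, 'inp' the mutated list, 'sub' the strand.
-- inp[element] is guarded in range, so List.getD is exact; sub[-1] is exact as getLastD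
-- because sub is never empty (it starts as [inp.pop(0)] and only grows).
def strandLoopA (inp : List Int) (element : Nat) (sub : List Int) : List Int :=
  if h : element < inp.length then
    if inp.getD element 0 > sub.getLastD 0 then
      strandLoopA (inp.eraseIdx element) element (sub ++ [inp.getD element 0])
    else
      strandLoopA inp (element + 1) sub
  else sub
termination_by inp.length - element
decreasing_by
  · simp [List.length_eraseIdx_of_lt h]; omega
  · omega

def strand (inp : List Int) : List Int :=
  match inp with
  | [] => []        -- Python: inp.pop(0) raises IndexError; excluded by Pre_strand
  | x :: rest => strandLoopA rest 0 [x]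

-- ===== PORT B =====
def strandLoopB (last : Int) (xs : List Int) (sub : List Int) : List Int :=
  match xs with
  | [] => sub
  | x :: xs => if x > last then strandLoopB x xs (sub ++ [x]) else strandLoopB last xs sub

def strand_alt (inp : List Int) : List Int :=
  match inp with
  | [] => []        -- Python: inp[0] raises IndexError; excluded by Pre_strand
  | first :: rest => strandLoopB first rest [first]

-- ===== PRECONDITION & SPEC =====
-- Pre_ excludes only the empty list, on which the Python A raises IndexError (inp.pop(0)).
def Pre_strand (inp : List Int) : Prop := inp ≠ []
instance (inp : List Int) : Decidable (Pre_strand inp) := by unfold Pre_strand; infer_instance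
def pvWitness_strand : List Int := [1, 3, 2]

def Spec_strand (inp : List Int) (out : List Int) : Prop := out = strand_alt inp
instance (inp : List Int) (out : List Int) : Decidable (Spec_strand inp out) := by unfold Spec_strand; infer_instance

-- ===== CLAIM (what is proved, stated in full; the proofs are below) =====
def Claim_equal_strand : Prop := ∀ (inp : List Int), Dom_strand inp → Pre_strand inp → Spec_strand inp (strand inp)

-- ===== LEMMAS AND PROOFS =====
-- A's cursor never revisits the skipped prefix, so the loop is a single forward pass over
-- the suffix: with the skipped elements 'pre' in front, it equals B's pass over 'xs'.
theorem strandLoopA_eq (xs : List Int) : ∀ (pre sub : List Int),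
    strandLoopA (pre ++ xs) pre.length sub = strandLoopB (sub.getLastD 0) xs sub := by
  induction xs with
  | nil =>
    intro pre sub
    rw [strandLoopA]
    simp [strandLoopB]
  | cons x xs ih =>
    intro pre sub
    rw [strandLoopA]
    have hlt : pre.length < (pre ++ x :: xs).length := by simp
    have hget : (pre ++ x :: xs).getD pre.length 0 = x := by
      simp [List.getD]
    have herase : (pre ++ x :: xs).eraseIdx pre.length = pre ++ xs := by
      rw [List.eraseIdx_append_of_length_le (Nat.le_refl pre.length)]
      simp
    simp only [hlt, dif_pos, hget, herase]
    by_cases hx : x > sub.getLastD 0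
    · simp only [if_pos hx]
      rw [ih pre (sub ++ [x]), List.getLastD_concat]
      rw [show strandLoopB (sub.getLastD 0) (x :: xs) sub
            = strandLoopB x xs (sub ++ [x]) from by rw [strandLoopB, if_pos hx]]
    · simp only [if_neg hx]
      have : strandLoopA (pre ++ x :: xs) (pre.length + 1) sub
           = strandLoopA ((pre ++ [x]) ++ xs) (pre ++ [x]).length sub := by
        simp
      rw [this, ih (pre ++ [x]) sub]
      rw [show strandLoopB (sub.getLastD 0) (x :: xs) sub
            = strandLoopB (sub.getLastD 0) xs sub from by rw [strandLoopB, if_neg hx]]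

-- ===== VERDICT (by name: the statement is the Claim_ definition above) =====
theorem strand_spec : Claim_equal_strand := by
  intro inp _ hpre
  unfold Spec_strand
  match inp with
  | [] => exact absurd rfl hpre
  | x :: rest =>
    show strandLoopA rest 0 [x] = _
    have := strandLoopA_eq rest [] [x]
    simpa using this
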